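-- pv_equiv track=rewrite | github.com/inviskahuna/python-first-homeworks | lesson07/home_work/loto.py | sort_rows
-- ===== SOURCE A (Python) =====
-- def sort_rows(row: list):
--     indexes = []
--     values = []
--     sorted_row = [0] * 9
--     for index, value in enumerate(row):
--         if value != 0:
--             indexes.append(index)
--             values.append(value)
--     sorted_values = sorted(values)
--     for j, i in enumerate(indexes):
--         sorted_row[i] = sorted_values[j]
--     return sorted_row
-- ===== SOURCE B (Python) =====
-- def sort_rows(row: list):
--     # In-place insertion sort over the non-zero cells: no call to sorted(),
--     # no index/value lists -- each non-zero value is bubbled into place as it arrives.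
--     result = [0] * 9
--     for i, v in enumerate(row):
--         if v != 0:
--             cur = v
--             for j in range(i):
--                 if row[j] != 0 and result[j] > cur:
--                     cur, result[j] = result[j], cur
--             result[i] = cur
--     return result
-- ===== Notes on version B (the rewrite author's own statement) =====
-- stated objective: alternative
-- what changed: B never calls sorted() and keeps no index/value lists: it does an online insertion sort directly in the 9-slot output, bubbling each arriving non-zero value through the earlier non-zero cells with a swap-carry pass.
import Mathlib
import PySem

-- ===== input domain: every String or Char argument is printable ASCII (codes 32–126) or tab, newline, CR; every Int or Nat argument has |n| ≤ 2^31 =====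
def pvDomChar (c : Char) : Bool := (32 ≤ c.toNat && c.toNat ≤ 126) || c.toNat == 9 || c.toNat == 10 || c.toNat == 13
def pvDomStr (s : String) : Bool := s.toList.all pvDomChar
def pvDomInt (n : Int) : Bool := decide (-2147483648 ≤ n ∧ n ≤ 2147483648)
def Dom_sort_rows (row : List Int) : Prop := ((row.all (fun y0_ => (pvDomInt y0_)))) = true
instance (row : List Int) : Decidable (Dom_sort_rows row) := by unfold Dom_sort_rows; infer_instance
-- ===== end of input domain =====

-- B drops A's sorted()-then-scatter approach: it is an online insertion sort performed
-- directly in the 9-slot output, bubbling each arriving non-zero value through the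
-- earlier non-zero cells (objective: alternative algorithm, no sorted(), no index list).

-- ===== PORT A =====
-- first loop: indexes/values accumulation over enumerate(row)
def sort_rows (row : List Int) : List Int :=
  let iv := (PySem.List.enumerate row 0).foldl
    (fun (acc : List Int × List Int) p =>
      if p.2 ≠ 0 then (acc.1 ++ [p.1], acc.2 ++ [p.2]) else acc) ([], [])
  let sorted_values := PySem.List.sorted iv.2 (fun x => x) false
  -- second loop: sorted_row[i] = sorted_values[j]; indices are in range under Pre_
  (PySem.List.enumerate iv.1 0).foldl
    (fun acc p => PySem.List.pySetD acc p.2 (PySem.List.pyGetD sorted_values p.1 0))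
    (List.replicate 9 0)

-- ===== PORT B =====
-- for each non-zero row[i]: carry cur through result[0..i-1]'s non-zero cells
-- (swap whenever result[j] > cur), then result[i] = cur
def sort_rows_alt (row : List Int) : List Int :=
  (PySem.List.enumerate row 0).foldl
    (fun (result : List Int) p =>
      if p.2 ≠ 0 then
        let st := (PySem.List.pyRange 0 p.1 1).foldl
          (fun (st : Int × List Int) j =>
            if PySem.List.pyGetD row j 0 ≠ 0 ∧ st.1 < PySem.List.pyGetD st.2 j 0 then
              (PySem.List.pyGetD st.2 j 0, PySem.List.pySetD st.2 j st.1)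
            else st) (p.2, result)
        PySem.List.pySetD st.2 p.1 st.1
      else result)
    (List.replicate 9 0)

-- ===== PRECONDITION & SPEC =====
-- Pre_ excludes exactly the inputs where A raises IndexError: a non-zero value at an index ≥ 9
-- (the assignment into the fixed 9-slot row is out of range there; B raises identically).
def Pre_sort_rows (row : List Int) : Prop := (row.drop 9).all (fun v => v == 0) = true
instance (row : List Int) : Decidable (Pre_sort_rows row) := by unfold Pre_sort_rows; infer_instance
def pvWitness_sort_rows : List Int := [0, 5, 0, 2, 7, 0, 1, 0, 3]

def Spec_sort_rows (row : List Int) (out : List Int) : Prop := out = sort_rows_alt row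
instance (row : List Int) (out : List Int) : Decidable (Spec_sort_rows row out) := by unfold Spec_sort_rows; infer_instance

-- ===== CLAIM (what is proved, stated in full; the proofs are below) =====
def Claim_equal_sort_rows : Prop := ∀ (row : List Int), Dom_sort_rows row → Pre_sort_rows row → Spec_sort_rows row (sort_rows row)

-- ===== LEMMAS AND PROOFS =====

-- scatter values L into positions P of array A (both ports' common normal form)
def pvScat (P : List Nat) (L A : List Int) : List Int :=
  (P.zip L).foldl (fun a q => a.set q.1 q.2) A

-- the non-zero positions of row below k
def pvNzp (row : List Int) (k : Nat) : List Nat :=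
  (List.range k).filter (fun j => row.getD j 0 ≠ 0)

-- insertion before the first strictly greater element (the order B maintains)
def pvIns (v : Int) : List Int → List Int
  | [] => [v]
  | w :: ws => if v < w then v :: w :: ws else w :: pvIns v ws

-- the multiset of values B holds after the first k cells, insertion-sorted
def pvW (row : List Int) : Nat → List Int
  | 0 => []
  | k+1 => if row.getD k 0 ≠ 0 then pvIns (row.getD k 0) (pvW row k) else pvW row k

-- the abstract effect of B's inner swap-carry pass on the stored value list
def pvCarry (cur : Int) : List Int → Int × List Int
  | [] => (cur, [])
  | w :: ws =>
    if cur < w then ((pvCarry w ws).1, cur :: (pvCarry w ws).2)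
    else ((pvCarry cur ws).1, w :: (pvCarry cur ws).2)

lemma pvScat_cons (p : Nat) (P : List Nat) (a : Int) (L A : List Int) :
    pvScat (p :: P) (a :: L) A = pvScat P L (A.set p a) := rfl

lemma getD_pvScat_notmem (P : List Nat) (L A : List Int) (q : Nat) (h : q ∉ P) :
    (pvScat P L A).getD q 0 = A.getD q 0 := by
  induction P generalizing L A with
  | nil => rfl
  | cons p P ih => cases L with
    | nil => rfl
    | cons a L =>
      rw [pvScat_cons, ih _ _ (by simp at h; exact h.2)]
      simp at h
      simp [List.getD, List.getElem?_set_ne (Ne.symm h.1)]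

lemma set_pvScat_notmem (P : List Nat) (L A : List Int) (q : Nat) (v : Int) (h : q ∉ P) :
    (pvScat P L A).set q v = pvScat P L (A.set q v) := by
  induction P generalizing L A with
  | nil => rfl
  | cons p P ih => cases L with
    | nil => rfl
    | cons a L =>
      simp at h
      rw [pvScat_cons, ih _ _ h.2, List.set_comm _ _ (Ne.symm h.1), pvScat_cons]

lemma pvScat_append_singleton (P : List Nat) (L A : List Int) (k : Nat) (c : Int)
    (hlen : L.length = P.length) :
    pvScat (P ++ [k]) (L ++ [c]) A = (pvScat P L A).set k c := by
  unfold pvScat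
  rw [List.zip_append (by simpa using hlen.symm), List.foldl_append]
  rfl

lemma length_pvCarry (cur : Int) (L : List Int) : (pvCarry cur L).2.length = L.length := by
  induction L generalizing cur with
  | nil => rfl
  | cons w ws ih => by_cases h : cur < w <;> simp [pvCarry, h, ih]

lemma length_pvIns (v : Int) (L : List Int) : (pvIns v L).length = L.length + 1 := by
  induction L with
  | nil => rfl
  | cons w ws ih => by_cases h : v < w <;> simp [pvIns, h, ih]

lemma pvIns_perm (v : Int) (L : List Int) : (pvIns v L).Perm (v :: L) := by
  induction L with
  | nil => simp [pvIns]
  | cons w ws ih =>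
    by_cases h : v < w
    · simp [pvIns, h]
    · simp only [pvIns, if_neg h]
      exact ((ih.cons w).trans (List.Perm.swap v w ws))

lemma pvIns_sorted (v : Int) (L : List Int) (h : L.Pairwise (· ≤ ·)) :
    (pvIns v L).Pairwise (· ≤ ·) := by
  induction L with
  | nil => simp [pvIns]
  | cons w ws ih =>
    rcases List.pairwise_cons.1 h with ⟨hw, hws⟩
    by_cases hvw : v < w
    · simp only [pvIns, if_pos hvw]
      refine List.pairwise_cons.2 ⟨?_, h⟩
      intro y hy
      rcases hy with _ | hy
      · exact le_of_lt hvw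
      · exact le_trans (le_of_lt hvw) (hw _ (by assumption))
    · simp only [pvIns, if_neg hvw]
      refine List.pairwise_cons.2 ⟨?_, ih hws⟩
      intro y hy
      rcases List.mem_cons.1 ((pvIns_perm v ws).mem_iff.1 hy) with rfl | hmem
      · omega
      · exact hw _ hmem

lemma pvIns_all_ge (v : Int) (L : List Int) (h : ∀ x ∈ L, v ≤ x) :
    pvIns v L = v :: L := by
  induction L with
  | nil => rfl
  | cons w ws ih =>
    by_cases hvw : v < w
    · simp [pvIns, hvw]
    · have hwv : w = v := le_antisymm (by omega) (h w (by simp))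
      subst hwv
      simp only [pvIns, if_neg hvw]
      rw [ih (fun x hx => h x (by simp [hx]))]

lemma pvCarry_spec (cur : Int) (L : List Int) (h : L.Pairwise (· ≤ ·)) :
    (pvCarry cur L).2 ++ [(pvCarry cur L).1] = pvIns cur L := by
  induction L generalizing cur with
  | nil => rfl
  | cons w ws ih =>
    rcases List.pairwise_cons.1 h with ⟨hw, hws⟩
    by_cases hc : cur < w
    · simp only [pvCarry, pvIns, if_pos hc, List.cons_append]
      rw [ih w hws, pvIns_all_ge w ws hw]
    · simp only [pvCarry, pvIns, if_neg hc, List.cons_append]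
      rw [ih cur hws]

-- dropping the never-firing iterations: if the step is the identity off p, fold over the filter
lemma foldl_filter_id {α β : Type} (p : β → Bool) (f : α → β → α) (l : List β) (a : α)
    (h : ∀ x b, p b = false → f x b = x) :
    l.foldl f a = (l.filter p).foldl f a := by
  induction l generalizing a with
  | nil => rfl
  | cons b l ih =>
    by_cases hb : p b
    · simp [hb, ih]
    · simp only [List.foldl_cons, List.filter_cons, hb, Bool.false_eq_true, if_false]
      rw [h a b (by simpa using hb), ih]

-- B's inner pass over the non-zero positions realises pvCarry on the stored values
lemma pvCarry_loop (row : List Int) (P : List Nat) (L A : List Int) (cur : Int)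
    (hmem : ∀ p ∈ P, row.getD p 0 ≠ 0 ∧ p < A.length)
    (hsort : P.Pairwise (· < ·))
    (hlen : L.length = P.length) :
    P.foldl (fun (st : Int × List Int) j =>
        if row.getD j 0 ≠ 0 ∧ st.1 < st.2.getD j 0 then
          (st.2.getD j 0, st.2.set j st.1) else st) (cur, pvScat P L A)
      = ((pvCarry cur L).1, pvScat P (pvCarry cur L).2 A) := by
  induction P generalizing L A cur with
  | nil =>
    have : L = [] := List.length_eq_zero_iff.1 (by simpa using hlen)
    subst this; rfl
  | cons p P ih =>
    cases L with
    | nil => simp at hlen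
    | cons a L =>
      have hpP : p ∉ P := by
        intro hp
        exact absurd ((List.pairwise_cons.1 hsort).1 p hp) (lt_irrefl p)
      have hnz : row.getD p 0 ≠ 0 := (hmem p (by simp)).1
      have hplt : p < A.length := (hmem p (by simp)).2
      have hread : (pvScat P L (A.set p a)).getD p 0 = a := by
        rw [getD_pvScat_notmem _ _ _ _ hpP]
        simp [List.getD, List.getElem?_set_self hplt]
      rw [pvScat_cons, List.foldl_cons]
      by_cases hc : cur < a
      · rw [if_pos (by rw [hread]; exact ⟨hnz, hc⟩), hread,
            set_pvScat_notmem _ _ _ _ _ hpP, List.set_set]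
        rw [ih L (A.set p cur) a
            (fun q hq => ⟨(hmem q (by simp [hq])).1, by simpa using (hmem q (by simp [hq])).2⟩)
            (List.pairwise_cons.1 hsort).2 (by simpa using hlen)]
        simp only [pvCarry, if_pos hc]
        rw [pvScat_cons]
      · rw [if_neg (by rw [hread]; exact fun h => hc h.2)]
        rw [ih L (A.set p a) cur
            (fun q hq => ⟨(hmem q (by simp [hq])).1, by simpa using (hmem q (by simp [hq])).2⟩)
            (List.pairwise_cons.1 hsort).2 (by simpa using hlen)]
        simp only [pvCarry, if_neg hc]
        rw [pvScat_cons]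

lemma pvNzp_succ (row : List Int) (k : Nat) :
    pvNzp row (k+1) =
      if row.getD k 0 ≠ 0 then pvNzp row k ++ [k] else pvNzp row k := by
  unfold pvNzp
  rw [List.range_succ, List.filter_append]
  by_cases h : row.getD k 0 ≠ 0
  · rw [if_pos h]
    simp only [List.filter_singleton, decide_eq_true h, Bool.cond_true]
  · rw [if_neg h]
    simp only [List.filter_singleton, decide_eq_false h, Bool.cond_false, List.append_nil]

lemma pvNzp_pairwise (row : List Int) (k : Nat) : (pvNzp row k).Pairwise (· < ·) :=
  (List.pairwise_lt_range).filter _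

lemma pvW_len (row : List Int) (k : Nat) : (pvW row k).length = (pvNzp row k).length := by
  induction k with
  | zero => rfl
  | succ k ih =>
    rw [pvNzp_succ]
    by_cases h : row.getD k 0 ≠ 0
    · rw [if_pos h]
      show (if row.getD k 0 ≠ 0 then pvIns (row.getD k 0) (pvW row k) else pvW row k).length = _
      rw [if_pos h, length_pvIns, ih]
      simp
    · rw [if_neg h]
      show (if row.getD k 0 ≠ 0 then pvIns (row.getD k 0) (pvW row k) else pvW row k).length = _
      rw [if_neg h, ih]

lemma pvW_sorted (row : List Int) (k : Nat) : (pvW row k).Pairwise (· ≤ ·) := by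
  induction k with
  | zero => exact List.Pairwise.nil
  | succ k ih =>
    show (if row.getD k 0 ≠ 0 then pvIns (row.getD k 0) (pvW row k) else pvW row k).Pairwise _
    by_cases h : row.getD k 0 ≠ 0
    · rw [if_pos h]; exact pvIns_sorted _ _ ih
    · rw [if_neg h]; exact ih

lemma pvW_perm (row : List Int) (k : Nat) :
    (pvW row k).Perm ((row.take k).filter (fun v => v ≠ 0)) := by
  induction k with
  | zero => simp [pvW]
  | succ k ih =>
    by_cases hk : k < row.length
    · have hget : row[k]? = some (row.getD k 0) := by
        simp [List.getD, List.getElem?_eq_getElem hk]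
      have hsplit : List.filter (fun v => decide (v ≠ 0)) (row.take (k+1))
          = List.filter (fun v => decide (v ≠ 0)) (row.take k)
            ++ List.filter (fun v => decide (v ≠ 0)) [row.getD k 0] := by
        rw [List.take_add_one, hget, List.filter_append]
        rfl
      show (if row.getD k 0 ≠ 0 then pvIns (row.getD k 0) (pvW row k) else pvW row k).Perm _
      rw [hsplit]
      by_cases h : row.getD k 0 ≠ 0
      · rw [if_pos h]
        simp only [List.filter_singleton, decide_eq_true h, Bool.cond_true]
        exact ((pvIns_perm _ _).trans (ih.cons _)).trans
          (List.perm_append_singleton _ _).symm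
      · rw [if_neg h]
        simp only [List.filter_singleton, decide_eq_false h, Bool.cond_false, List.append_nil]
        exact ih
    · have hget : row.getD k 0 = 0 := by
        rw [List.getD_eq_getElem?_getD, List.getElem?_eq_none (show row.length ≤ k by omega)]
        rfl
      have h1 : row.take (k+1) = row.take k := by
        rw [List.take_of_length_le (by omega), List.take_of_length_le (by omega)]
      show (if row.getD k 0 ≠ 0 then pvIns (row.getD k 0) (pvW row k) else pvW row k).Perm _
      rw [if_neg (by rw [hget]; simp), h1]
      exact ih

lemma pvNzp_stable (row : List Int) (k : Nat) (h : row.length ≤ k) :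
    pvNzp row k = pvNzp row row.length ∧ pvW row k = pvW row row.length := by
  induction k with
  | zero => have : row.length = 0 := by omega
            rw [this]; exact ⟨rfl, rfl⟩
  | succ k ih =>
    rcases Nat.lt_or_ge row.length (k+1) with h' | h'
    · have hle : row.length ≤ k := by omega
      have hget : row.getD k 0 = 0 := by
        rw [List.getD_eq_getElem?_getD, List.getElem?_eq_none hle]
        rfl
      rcases ih hle with ⟨h1, h2⟩
      constructor
      · rw [pvNzp_succ, if_neg (by rw [hget]; simp), h1]
      · show (if row.getD k 0 ≠ 0 then pvIns (row.getD k 0) (pvW row k) else pvW row k) = _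
        rw [if_neg (by rw [hget]; simp)]
        exact h2
    · have : row.length = k + 1 := by omega
      rw [this]; exact ⟨rfl, rfl⟩

-- B's outer loop: invariant 'result = pvScat (pvNzp k) (pvW k) base' over the suffix from k
lemma B_outer (row : List Int) (hPre : ∀ j : Nat, row.getD j 0 ≠ 0 → j < 9) :
    ∀ (t : List Int) (k : Nat), row.drop k = t →
    (PySem.List.enumerate t (k : Int)).foldl
      (fun (result : List Int) p =>
        if p.2 ≠ 0 then
          let st := (PySem.List.pyRange 0 p.1 1).foldl
            (fun (st : Int × List Int) j =>
              if PySem.List.pyGetD row j 0 ≠ 0 ∧ st.1 < PySem.List.pyGetD st.2 j 0 then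
                (PySem.List.pyGetD st.2 j 0, PySem.List.pySetD st.2 j st.1)
              else st) (p.2, result)
          PySem.List.pySetD st.2 p.1 st.1
        else result)
      (pvScat (pvNzp row k) (pvW row k) (List.replicate 9 0))
      = pvScat (pvNzp row row.length) (pvW row row.length) (List.replicate 9 0) := by
  intro t
  induction t with
  | nil =>
    intro k hk
    have hlen : row.length ≤ k := by
      by_contra h
      have := List.drop_eq_nil_iff.1 hk
      omega
    rcases pvNzp_stable row k hlen with ⟨h1, h2⟩
    rw [PySem.List.enumerate_nil, List.foldl_nil, h1, h2]
  | cons x t ih =>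
    intro k hk
    have hklt : k < row.length := by
      by_contra h
      rw [List.drop_eq_nil_iff.2 (by omega)] at hk
      exact List.cons_ne_nil x t hk.symm
    have hx : row.getD k 0 = x := by
      have h00 : (row.drop k)[0]? = some x := by rw [hk]; rfl
      rw [List.getElem?_drop] at h00
      have h0 : row[k]? = some x := by simpa using h00
      rw [List.getD_eq_getElem?_getD, h0]
      rfl
    have ht : row.drop (k+1) = t := by
      have := congrArg List.tail hk
      simpa [List.tail_drop] using this
    rw [PySem.List.enumerate_cons, List.foldl_cons]
    by_cases hxz : x = 0
    · rw [if_neg (by simp [hxz])]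
      have h1 : pvNzp row (k+1) = pvNzp row k := by
        rw [pvNzp_succ, if_neg (by rw [hx]; simp [hxz])]
      have h2 : pvW row (k+1) = pvW row k := by
        show (if row.getD k 0 ≠ 0 then pvIns (row.getD k 0) (pvW row k) else pvW row k) = _
        rw [if_neg (by rw [hx]; simp [hxz])]
      have := ih (k+1) ht
      rw [h1, h2] at this
      simpa using this
    · rw [if_pos (by simp [hxz])]
      -- reduce the inner Int-indexed range fold to the Nat fold over pvNzp row k
      have hrange : PySem.List.pyRange 0 (k : Int) 1
          = (List.range k).map (fun j => (Nat.cast j : Int)) := by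
        rw [PySem.List.pyRange_one]
        simp only [sub_zero, Int.toNat_natCast, zero_add]
      have hinner :
          (PySem.List.pyRange 0 (k : Int) 1).foldl
            (fun (st : Int × List Int) j =>
              if PySem.List.pyGetD row j 0 ≠ 0 ∧ st.1 < PySem.List.pyGetD st.2 j 0 then
                (PySem.List.pyGetD st.2 j 0, PySem.List.pySetD st.2 j st.1)
              else st) (x, pvScat (pvNzp row k) (pvW row k) (List.replicate 9 0))
          = ((pvCarry x (pvW row k)).1,
             pvScat (pvNzp row k) (pvCarry x (pvW row k)).2 (List.replicate 9 0)) := by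
        rw [hrange, List.foldl_map]
        have hstep : ∀ (st : Int × List Int) (j : Nat),
            (if PySem.List.pyGetD row (j : Int) 0 ≠ 0 ∧ st.1 < PySem.List.pyGetD st.2 (j : Int) 0 then
              (PySem.List.pyGetD st.2 (j : Int) 0, PySem.List.pySetD st.2 (j : Int) st.1)
            else st)
            = (if row.getD j 0 ≠ 0 ∧ st.1 < st.2.getD j 0 then
                (st.2.getD j 0, st.2.set j st.1) else st) := by
          intro st j
          simp [PySem.List.pyGetD_natCast, PySem.List.pySetD_natCast]
        simp only [hstep]
        rw [foldl_filter_id (fun j => decide (row.getD j 0 ≠ 0)) _ (List.range k) _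
          (by intro st j hj
              simp at hj
              rw [if_neg (by simp [hj])])]
        exact pvCarry_loop row (pvNzp row k) (pvW row k) (List.replicate 9 0) x
          (fun p hp => ⟨by simpa using (List.of_mem_filter hp),
                        by simpa using hPre p (by simpa using (List.of_mem_filter hp))⟩)
          (pvNzp_pairwise row k) (pvW_len row k)
      simp only [hinner]
      have hset : PySem.List.pySetD
          (pvScat (pvNzp row k) (pvCarry x (pvW row k)).2 (List.replicate 9 0))
          (k : Int) (pvCarry x (pvW row k)).1
          = pvScat (pvNzp row (k+1)) (pvW row (k+1)) (List.replicate 9 0) := by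
        rw [PySem.List.pySetD_natCast]
        rw [← pvScat_append_singleton _ _ _ k _
            (by rw [length_pvCarry, pvW_len])]
        rw [pvCarry_spec x (pvW row k) (pvW_sorted row k)]
        rw [pvNzp_succ, if_pos (by rw [hx]; exact hxz)]
        have hW : pvW row (k+1) = pvIns x (pvW row k) := by
          show (if row.getD k 0 ≠ 0 then pvIns (row.getD k 0) (pvW row k) else pvW row k) = _
          rw [hx, if_pos hxz]
        rw [hW]
      rw [hset]
      exact ih (k+1) ht

-- ========== A-side characterisation (extract, sort, scatter) ==========

-- the (index, value) pairs of the non-zero entries, enumerated from s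
def pvNz (row : List Int) (s : Int) : List (Int × Int) :=
  (PySem.List.enumerate row s).filter (fun p => p.2 ≠ 0)

lemma pvNz_cons (x : Int) (row : List Int) (s : Int) :
    pvNz (x :: row) s = if x ≠ 0 then (s, x) :: pvNz row (s+1) else pvNz row (s+1) := by
  simp [pvNz, PySem.List.enumerate_cons, List.filter]
  split_ifs with h <;> simp_all

-- A's first loop computes (map fst of pvNz, map snd of pvNz)
lemma A_first_loop (row : List Int) (s : Int) (a b : List Int) :
    (PySem.List.enumerate row s).foldl
      (fun (acc : List Int × List Int) p =>
        if p.2 ≠ 0 then (acc.1 ++ [p.1], acc.2 ++ [p.2]) else acc) (a, b)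
      = (a ++ (pvNz row s).map (·.1), b ++ (pvNz row s).map (·.2)) := by
  induction row generalizing s a b with
  | nil => simp [pvNz, PySem.List.enumerate_nil]
  | cons x t ih =>
    simp only [PySem.List.enumerate_cons, List.foldl_cons]
    rw [pvNz_cons]
    by_cases h : x = 0
    · rw [if_neg (by simp [h]), if_neg (by simp [h])]
      exact ih (s+1) a b
    · rw [if_pos (by simp [h]), if_pos (by simp [h])]
      rw [ih (s+1) (a ++ [s]) (b ++ [x])]
      simp

-- values collected = row.filter (· ≠ 0)
lemma pvNz_snd (row : List Int) (s : Int) :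
    (pvNz row s).map (·.2) = row.filter (fun v => v ≠ 0) := by
  induction row generalizing s with
  | nil => rfl
  | cons x t ih =>
    rw [pvNz_cons]
    by_cases h : x = 0 <;> simp [h, List.filter, ih]

-- indexes collected = the non-zero positions, as Ints
lemma pvNz_fst (row : List Int) :
    ∀ (t : List Int) (k : Nat), row.drop k = t →
    (pvNz t (k : Int)).map (·.1)
      = ((List.range' k t.length).filter (fun j => row.getD j 0 ≠ 0)).map
          (fun j => (Nat.cast j : Int)) := by
  intro t
  induction t with
  | nil => intro k _; rfl
  | cons x t ih =>
    intro k hk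
    have hklt : k < row.length := by
      by_contra h
      rw [List.drop_eq_nil_iff.2 (by omega)] at hk
      exact List.cons_ne_nil x t hk.symm
    have hx : row.getD k 0 = x := by
      have h00 : (row.drop k)[0]? = some x := by rw [hk]; rfl
      rw [List.getElem?_drop] at h00
      have h0 : row[k]? = some x := by simpa using h00
      rw [List.getD_eq_getElem?_getD, h0]
      rfl
    have ht : row.drop (k+1) = t := by
      have := congrArg List.tail hk
      simpa [List.tail_drop] using this
    rw [pvNz_cons, List.length_cons, List.range'_succ, List.filter_cons]
    by_cases h : x = 0
    · rw [if_neg (by simp [h]), if_neg (by rw [hx]; simp [h]),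
          show ((k : Int) + 1) = ((k+1 : Nat) : Int) from by push_cast; ring]
      exact ih (k+1) ht
    · rw [if_pos (by simp [h]), if_pos (by rw [hx]; simp [h]),
          show ((k : Int) + 1) = ((k+1 : Nat) : Int) from by push_cast; ring]
      simp only [List.map_cons]
      rw [ih (k+1) ht]

-- scatter with Int positions (A's second loop shape)
def pvScatI (init : List Int) (ps : List (Int × Int)) : List Int :=
  ps.foldl (fun acc p => PySem.List.pySetD acc p.1 p.2) init

-- A's second loop is a scatter of zip(indexes, sorted_values)
lemma A_second_loop (sv : List Int) (idxs : List Int) (s : Nat) (init : List Int)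
    (hlen : s + idxs.length ≤ sv.length) :
    (PySem.List.enumerate idxs (s : Int)).foldl
      (fun acc p => PySem.List.pySetD acc p.2 (PySem.List.pyGetD sv p.1 0)) init
      = pvScatI init (idxs.zip (sv.drop s)) := by
  induction idxs generalizing s init with
  | nil => simp [pvScatI, PySem.List.enumerate_nil]
  | cons i t ih =>
    rw [PySem.List.enumerate_cons, List.foldl_cons]
    have hs : s < sv.length := by simp at hlen; omega
    have hdrop : sv.drop s = sv[s] :: sv.drop (s + 1) :=
      (List.drop_eq_getElem_cons hs)
    have hget : PySem.List.pyGetD sv (s : Int) 0 = sv[s] := by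
      simp [PySem.List.pyGetD_natCast, List.getD_eq_getElem?_getD, hs]
    have hcast : ((s : Int) + 1) = ((s + 1 : Nat) : Int) := by push_cast; ring
    rw [hget, hcast, ih (s + 1) _ (by simp at hlen ⊢; omega)]
    rw [hdrop, List.zip_cons_cons]
    simp [pvScatI]

-- an Int-position scatter at cast positions is the Nat-position scatter
lemma pvScatI_cast (P : List Nat) (L A : List Int) :
    pvScatI A ((P.map (fun j => (Nat.cast j : Int))).zip L) = pvScat P L A := by
  induction P generalizing L A with
  | nil => rfl
  | cons p P ih =>
    cases L with
    | nil => rfl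
    | cons a L =>
      simp only [List.map_cons, List.zip_cons_cons]
      show pvScatI (PySem.List.pySetD A (p : Int) a) _ = _
      rw [PySem.List.pySetD_natCast, ih, pvScat_cons]

lemma pvNz_length (row : List Int) (s : Int) :
    (pvNz row s).length = (row.filter (fun v => v ≠ 0)).length := by
  rw [← pvNz_snd row s, List.length_map]

-- B's insertion-sorted value list is exactly sorted(values)
lemma pvW_eq_sorted (row : List Int) :
    PySem.List.sorted (row.filter (fun v => v ≠ 0)) (fun x => x) false
      = pvW row row.length := by
  refine PySem.List.sorted_id_eq_of_perm_of_pairwise _ _ ?_ ?_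
  · simpa using pvW_perm row row.length
  · exact pvW_sorted row row.length

-- ===== VERDICT lemma: both ports equal the common normal form =====
theorem sort_rows_spec : Claim_equal_sort_rows := by
  intro row _ hpre
  have hPre : ∀ j : Nat, row.getD j 0 ≠ 0 → j < 9 := by
    intro j hj
    by_contra h
    have hjlt : j < row.length := by
      by_contra h'
      exact hj (by simp [List.getD, List.getElem?_eq_none (by omega : row.length ≤ j)])
    have hmem : row.getD j 0 ∈ row.drop 9 := by
      have : row.getD j 0 = row[j] := by
        simp [List.getD, List.getElem?_eq_getElem hjlt]
      rw [this]
      have : row[j] = (row.drop 9)[j - 9]'(by simp; omega) := by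
        simp [List.getElem_drop]
        congr 1
        omega
      rw [this]
      exact List.getElem_mem _
    have := (List.all_eq_true.1 hpre) _ hmem
    simp at this
    exact hj this
  unfold Spec_sort_rows sort_rows sort_rows_alt
  -- A side
  rw [A_first_loop row 0 [] []]
  simp only [List.nil_append]
  have h2 := A_second_loop (PySem.List.sorted ((pvNz row 0).map (·.2)) (fun x => x) false)
    ((pvNz row 0).map (·.1)) 0 (List.replicate 9 0)
    (by simp [PySem.List.length_sorted, pvNz_snd, pvNz_length])
  simp only [Nat.cast_zero, List.drop_zero] at h2
  rw [h2]
  have hfst := pvNz_fst row row 0 (by simp)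
  simp only [Nat.cast_zero] at hfst
  rw [hfst, pvNz_snd, ← List.range_eq_range']
  show pvScatI _ (((pvNzp row row.length).map _).zip _) = _
  rw [pvScatI_cast, pvW_eq_sorted]
  -- B side
  have hB := B_outer row hPre row 0 (by simp)
  simp only [Nat.cast_zero] at hB
  show pvScat _ _ _ = _
  rw [← hB]
  rfl
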